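-- pv_equiv track=rewrite | github.com/ardatalar/EuropeOrthoViewer | rest_utils.py | _prefer_arcgis_format
-- ===== SOURCE A (Python) =====
-- from typing import Dict, List, Optional, Tuple
--
-- def _prefer_arcgis_format(requested_fmt: Optional[str], available: List[str]) -> str:
--     """
--     Choose a good image format for MapServer export.
--     Priority: requested -> png32 -> png24 -> png8 -> png -> jpg/jpeg -> first/PNG32.
--     """
--     if requested_fmt:
--         r = requested_fmt.strip().lower()
--         if r in available:
--             return r
--
--     prefs = ["png32", "png24", "png8", "png", "jpg", "jpeg"]
--     for p in prefs:
--         if p in available: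
--             return p
--
--     return available[0] if available else "png32"
-- ===== SOURCE B (Python) =====
-- def _prefer_arcgis_format(requested_fmt, available):
--     rank = {"png32": 1, "png24": 2, "png8": 3, "png": 4, "jpg": 5, "jpeg": 6}
--     if requested_fmt:
--         rank[requested_fmt.strip().lower()] = 0
--     best = None
--     for f in available:
--         k = rank.get(f, 7)
--         if best is None or k < best[1]:
--             best = (f, k)
--     return best[0] if best is not None else "png32"
-- ===== Notes on version B (the rewrite author's own statement) =====
-- stated objective: alternative
-- what changed: Replaces the membership cascade (requested-in-available check followed by a loop over the preference list with an 'in available' scan per preference) by a rank dictionary and a single pass over available that keeps the element of minimum rank, first occurrence winning ties.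
import Mathlib
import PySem

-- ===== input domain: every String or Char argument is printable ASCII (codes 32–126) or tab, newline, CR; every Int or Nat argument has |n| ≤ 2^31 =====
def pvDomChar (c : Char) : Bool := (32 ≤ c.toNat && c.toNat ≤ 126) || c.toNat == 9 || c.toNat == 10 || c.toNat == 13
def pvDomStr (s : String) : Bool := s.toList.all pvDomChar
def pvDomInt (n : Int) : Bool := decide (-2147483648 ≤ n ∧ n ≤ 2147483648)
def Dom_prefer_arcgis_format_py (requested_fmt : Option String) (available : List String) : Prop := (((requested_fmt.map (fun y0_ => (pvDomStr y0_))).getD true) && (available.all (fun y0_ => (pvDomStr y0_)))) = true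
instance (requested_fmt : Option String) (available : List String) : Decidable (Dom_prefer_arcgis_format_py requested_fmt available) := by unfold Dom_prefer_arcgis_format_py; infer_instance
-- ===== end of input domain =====

-- B replaces A's membership cascade by a rank dictionary and a single min-rank pass over `available` (alternative decomposition, same behaviour).


-- ===== PORT A =====
def prefer_arcgis_format_py (requested_fmt : Option String) (available : List String) : String :=
  -- if requested_fmt: r = requested_fmt.strip().lower(); if r in available: return r
  let req : Option String :=
    match requested_fmt with
    | some s =>
      if s ≠ "" then
        let r := PySem.Str.lower (PySem.Str.strip s)
        if available.contains r then some r else none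
      else none
    | none => none
  match req with
  | some r => r
  | none =>
    -- for p in prefs: if p in available: return p
    match ["png32", "png24", "png8", "png", "jpg", "jpeg"].find? (fun p => available.contains p) with
    | some p => p
    | none =>
      -- return available[0] if available else "png32"
      match available with
      | a :: _ => a
      | [] => "png32"

-- ===== PORT B =====
-- rank dictionary: fixed preferences 1..6, requested (if truthy) rank 0, anything else 7 at lookup
def pvRank (requested_fmt : Option String) : PySem.Dict String Int :=
  let base : PySem.Dict String Int :=
    PySem.Dict.ofList [("png32", 1), ("png24", 2), ("png8", 3), ("png", 4), ("jpg", 5), ("jpeg", 6)]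
  match requested_fmt with
  | some s =>
    if s ≠ "" then base.insert (PySem.Str.lower (PySem.Str.strip s)) 0 else base
  | none => base

-- loop body: keep the best (lowest-rank, first occurrence) element seen so far
def pvStep (rank : PySem.Dict String Int) (best : Option (String × Int)) (f : String) : Option (String × Int) :=
  let k := rank.getD f 7
  match best with
  | none => some (f, k)
  | some (bf, bk) => if k < bk then some (f, k) else some (bf, bk)

def prefer_arcgis_format_py_alt (requested_fmt : Option String) (available : List String) : String :=
  let rank := pvRank requested_fmt
  match available.foldl (pvStep rank) none with
  | some (bf, _) => bf
  | none => "png32"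

-- ===== PRECONDITION & SPEC =====
def Spec_prefer_arcgis_format_py (requested_fmt : Option String) (available : List String) (out : String) : Prop := out = prefer_arcgis_format_py_alt requested_fmt available
instance (requested_fmt : Option String) (available : List String) (out : String) : Decidable (Spec_prefer_arcgis_format_py requested_fmt available out) := by unfold Spec_prefer_arcgis_format_py; infer_instance

-- ===== CLAIM (what is proved, stated in full; the proofs are below) =====
def Claim_equal_prefer_arcgis_format_py : Prop := ∀ (requested_fmt : Option String) (available : List String), Dom_prefer_arcgis_format_py requested_fmt available → Spec_prefer_arcgis_format_py requested_fmt available (prefer_arcgis_format_py requested_fmt available)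

-- ===== LEMMAS AND PROOFS =====

-- the processed requested format (r if requested_fmt is truthy, else none)
def pvReq (requested_fmt : Option String) : Option String :=
  match requested_fmt with
  | some s => if s ≠ "" then some (PySem.Str.lower (PySem.Str.strip s)) else none
  | none => none

-- the rank function B's dictionary implements
def pvRk (r? : Option String) (f : String) : Int :=
  if r? = some f then 0
  else if f = "png32" then 1
  else if f = "png24" then 2
  else if f = "png8" then 3
  else if f = "png" then 4
  else if f = "jpg" then 5
  else if f = "jpeg" then 6
  else 7

-- tail of B's loop as a recursion (current best b, remaining xs)
def pvMinFrom (rk : String → Int) (b : String) : List String → String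
  | [] => b
  | x :: xs => pvMinFrom rk (if rk x < rk b then x else b) xs

lemma pvMinFrom_mem (rk : String → Int) (xs : List String) : ∀ b, pvMinFrom rk b xs = b ∨ pvMinFrom rk b xs ∈ xs := by
  induction xs with
  | nil => intro b; left; rfl
  | cons x xs ih =>
    intro b
    simp only [pvMinFrom]
    rcases ih (if rk x < rk b then x else b) with h | h
    · rw [h]; split
      · right; exact List.mem_cons_self
      · left; rfl
    · right; exact List.mem_cons_of_mem _ h

lemma pvMinFrom_min (rk : String → Int) (xs : List String) : ∀ b y, (y = b ∨ y ∈ xs) → rk (pvMinFrom rk b xs) ≤ rk y := by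
  induction xs with
  | nil =>
    intro b y hy
    rcases hy with rfl | h
    · exact le_refl _
    · cases h
  | cons x xs ih =>
    intro b y hy
    simp only [pvMinFrom]
    rcases hy with rfl | hy
    · by_cases h : rk x < rk y
      · have := ih (if rk x < rk y then x else y) x (Or.inl (by simp [h]))
        simp only [if_pos h] at this ⊢
        omega
      · exact ih _ y (Or.inl (by simp [h]))
    · rcases List.mem_cons.mp hy with rfl | hy
      · by_cases h : rk y < rk b
        · exact ih _ y (Or.inl (by simp [h]))
        · have := ih (if rk y < rk b then y else b) b (Or.inl (by simp [h]))
          simp only [if_neg h] at this ⊢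
          omega
      · exact ih _ y (Or.inr hy)

lemma pvMinFrom_stay (rk : String → Int) (xs : List String) : ∀ b, (∀ y ∈ xs, ¬ rk y < rk b) → pvMinFrom rk b xs = b := by
  induction xs with
  | nil => intro b _; rfl
  | cons x xs ih =>
    intro b h
    simp only [pvMinFrom]
    rw [if_neg (h x List.mem_cons_self)]
    exact ih b (fun y hy => h y (List.mem_cons_of_mem _ hy))

-- B's fold computes pvMinFrom
lemma pv_fold_min (rank : PySem.Dict String Int) (xs : List String) : ∀ (b : String),
    xs.foldl (pvStep rank) (some (b, rank.getD b 7)) =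
    some (pvMinFrom (fun f => rank.getD f 7) b xs,
          rank.getD (pvMinFrom (fun f => rank.getD f 7) b xs) 7) := by
  induction xs with
  | nil => intro b; rfl
  | cons x xs ih =>
    intro b
    simp only [List.foldl_cons, pvStep, pvMinFrom]
    by_cases h : rank.getD x 7 < rank.getD b 7
    · simp only [if_pos h]; exact ih x
    · simp only [if_neg h]; exact ih b

-- the rank dictionary's lookup is pvRk
lemma pv_rank_eq (requested_fmt : Option String) :
    (fun f => (pvRank requested_fmt).getD f 7) = pvRk (pvReq requested_fmt) := by
  funext f
  have hbase : (PySem.Dict.ofList [("png32", (1:Int)), ("png24", 2), ("png8", 3), ("png", 4), ("jpg", 5), ("jpeg", 6)]).getD f 7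
      = (if f = "png32" then 1 else if f = "png24" then 2 else if f = "png8" then 3 else if f = "png" then 4 else if f = "jpg" then 5 else if f = "jpeg" then 6 else 7) := by
    rw [show PySem.Dict.ofList [("png32", (1:Int)), ("png24", 2), ("png8", 3), ("png", 4), ("jpg", 5), ("jpeg", 6)]
        = PySem.Dict.mk [("png32", 1), ("png24", 2), ("png8", 3), ("png", 4), ("jpg", 5), ("jpeg", 6)] from by decide]
    simp only [PySem.Dict.getD_eq_get?_getD, PySem.Dict.get?_mk_cons, beq_iff_eq]
    by_cases h1 : f = "png32"
    · simp [h1]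
    · rw [if_neg (fun he => h1 he.symm), if_neg h1]
      by_cases h2 : f = "png24"
      · simp [h2]
      · rw [if_neg (fun he => h2 he.symm), if_neg h2]
        by_cases h3 : f = "png8"
        · simp [h3]
        · rw [if_neg (fun he => h3 he.symm), if_neg h3]
          by_cases h4 : f = "png"
          · simp [h4]
          · rw [if_neg (fun he => h4 he.symm), if_neg h4]
            by_cases h5 : f = "jpg"
            · simp [h5]
            · rw [if_neg (fun he => h5 he.symm), if_neg h5]
              by_cases h6 : f = "jpeg"
              · simp [h6]
              · rw [if_neg (fun he => h6 he.symm), if_neg h6]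
                simp [PySem.Dict.get?]
  cases requested_fmt with
  | none => simp [pvRank, pvReq, pvRk, hbase]
  | some s =>
    by_cases hs : s = ""
    · simp [pvRank, pvReq, pvRk, hs, hbase]
    · simp only [pvRank, pvReq, pvRk, hs, ne_eq, not_false_iff, if_pos]
      rw [PySem.Dict.getD_insert]
      rw [hbase]
      by_cases h : f = PySem.Str.lower (PySem.Str.strip s) <;> simp [h, eq_comm]

-- A rewritten through pvReq
def pvFall (available : List String) : String :=
  match ["png32", "png24", "png8", "png", "jpg", "jpeg"].find? (fun p => available.contains p) with
  | some p => p
  | none =>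
    match available with
    | a :: _ => a
    | [] => "png32"

lemma pvA_eq (requested_fmt : Option String) (available : List String) :
    prefer_arcgis_format_py requested_fmt available =
    (match pvReq requested_fmt with
     | some r => if available.contains r then r else pvFall available
     | none => pvFall available) := by
  cases requested_fmt with
  | none => rfl
  | some s =>
    by_cases hs : s = ""
    · simp [prefer_arcgis_format_py, pvReq, pvFall, hs]
    · by_cases hc : available.contains (PySem.Str.lower (PySem.Str.strip s))
      · have hm : PySem.Str.lower (PySem.Str.strip s) ∈ available := List.contains_iff_mem.mp hc
        simp [prefer_arcgis_format_py, pvReq, pvFall, hs, hm]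
      · simp only [prefer_arcgis_format_py, pvReq, hs, ne_eq, not_false_iff, if_pos]
        rw [if_neg hc, if_neg hc]
        rfl

lemma pvB_eq (requested_fmt : Option String) (available : List String) :
    prefer_arcgis_format_py_alt requested_fmt available =
    (match available with
     | [] => "png32"
     | a :: rest => pvMinFrom (pvRk (pvReq requested_fmt)) a rest) := by
  cases available with
  | nil => rfl
  | cons a rest =>
    simp only [prefer_arcgis_format_py_alt, List.foldl_cons]
    rw [show pvStep (pvRank requested_fmt) none a
        = some (a, (pvRank requested_fmt).getD a 7) from rfl]
    rw [pv_fold_min]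
    rw [pv_rank_eq]

-- basic pvRk fact
lemma pvRk_eq_zero (r? : Option String) (f : String) (h : pvRk r? f ≤ 0) : r? = some f := by
  unfold pvRk at h; split_ifs at h <;> first | assumption | omega

-- A's preference cascade agrees with B's min-rank pass when the requested format is absent
lemma pv_fall_eq (r? : Option String) (a : String) (rest : List String)
    (hne : ∀ f ∈ a :: rest, r? ≠ some f) :
    pvFall (a :: rest) = pvMinFrom (pvRk r?) a rest := by
  set c := pvMinFrom (pvRk r?) a rest with hc
  have hmem : c = a ∨ c ∈ rest := pvMinFrom_mem (pvRk r?) rest a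
  have hmin : ∀ y, (y = a ∨ y ∈ rest) → pvRk r? c ≤ pvRk r? y := pvMinFrom_min (pvRk r?) rest a
  have hcmem : c ∈ a :: rest := by
    rcases hmem with h | h
    · rw [h]; exact List.mem_cons_self
    · exact List.mem_cons_of_mem _ h
  have hnec : r? ≠ some c := hne c hcmem
  unfold pvFall
  simp only [List.find?]
  by_cases h1 : (a :: rest).contains "png32"
  · simp only [h1]
    have hle := hmin "png32" (List.mem_cons.mp (List.contains_iff_mem.mp h1))
    have hp : pvRk r? "png32" = 1 := by
      simp only [pvRk, if_neg (hne "png32" (List.contains_iff_mem.mp h1))]; rfl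
    rw [hp] at hle
    refine Eq.symm ?_
    unfold pvRk at hle
    rw [if_neg hnec] at hle
    split_ifs at hle <;> first | assumption | omega
  · have hne1 : ∀ f ∈ a :: rest, f ≠ "png32" := by
      intro f hf he; exact h1 (he ▸ List.contains_iff_mem.mpr hf)
    simp only [h1]
    by_cases h2 : (a :: rest).contains "png24"
    · simp only [h2]
      have hle := hmin "png24" (List.mem_cons.mp (List.contains_iff_mem.mp h2))
      have hp : pvRk r? "png24" = 2 := by
        simp only [pvRk, if_neg (hne "png24" (List.contains_iff_mem.mp h2))]; rfl
      rw [hp] at hle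
      refine Eq.symm ?_
      unfold pvRk at hle
      rw [if_neg hnec, if_neg (hne1 c hcmem)] at hle
      split_ifs at hle <;> first | assumption | omega
    · have hne2 : ∀ f ∈ a :: rest, f ≠ "png24" := by
        intro f hf he; exact h2 (he ▸ List.contains_iff_mem.mpr hf)
      simp only [h2]
      by_cases h3 : (a :: rest).contains "png8"
      · simp only [h3]
        have hle := hmin "png8" (List.mem_cons.mp (List.contains_iff_mem.mp h3))
        have hp : pvRk r? "png8" = 3 := by
          simp only [pvRk, if_neg (hne "png8" (List.contains_iff_mem.mp h3))]; rfl
        rw [hp] at hle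
        refine Eq.symm ?_
        unfold pvRk at hle
        rw [if_neg hnec, if_neg (hne1 c hcmem), if_neg (hne2 c hcmem)] at hle
        split_ifs at hle <;> first | assumption | omega
      · have hne3 : ∀ f ∈ a :: rest, f ≠ "png8" := by
          intro f hf he; exact h3 (he ▸ List.contains_iff_mem.mpr hf)
        simp only [h3]
        by_cases h4 : (a :: rest).contains "png"
        · simp only [h4]
          have hle := hmin "png" (List.mem_cons.mp (List.contains_iff_mem.mp h4))
          have hp : pvRk r? "png" = 4 := by
            simp only [pvRk, if_neg (hne "png" (List.contains_iff_mem.mp h4))]; rfl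
          rw [hp] at hle
          refine Eq.symm ?_
          unfold pvRk at hle
          rw [if_neg hnec, if_neg (hne1 c hcmem), if_neg (hne2 c hcmem), if_neg (hne3 c hcmem)] at hle
          split_ifs at hle <;> first | assumption | omega
        · have hne4 : ∀ f ∈ a :: rest, f ≠ "png" := by
            intro f hf he; exact h4 (he ▸ List.contains_iff_mem.mpr hf)
          simp only [h4]
          by_cases h5 : (a :: rest).contains "jpg"
          · simp only [h5]
            have hle := hmin "jpg" (List.mem_cons.mp (List.contains_iff_mem.mp h5))
            have hp : pvRk r? "jpg" = 5 := by
              simp only [pvRk, if_neg (hne "jpg" (List.contains_iff_mem.mp h5))]; rfl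
            rw [hp] at hle
            refine Eq.symm ?_
            unfold pvRk at hle
            rw [if_neg hnec, if_neg (hne1 c hcmem), if_neg (hne2 c hcmem), if_neg (hne3 c hcmem), if_neg (hne4 c hcmem)] at hle
            split_ifs at hle <;> first | assumption | omega
          · have hne5 : ∀ f ∈ a :: rest, f ≠ "jpg" := by
              intro f hf he; exact h5 (he ▸ List.contains_iff_mem.mpr hf)
            simp only [h5]
            by_cases h6 : (a :: rest).contains "jpeg"
            · simp only [h6]
              have hle := hmin "jpeg" (List.mem_cons.mp (List.contains_iff_mem.mp h6))
              have hp : pvRk r? "jpeg" = 6 := by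
                simp only [pvRk, if_neg (hne "jpeg" (List.contains_iff_mem.mp h6))]; rfl
              rw [hp] at hle
              refine Eq.symm ?_
              unfold pvRk at hle
              rw [if_neg hnec, if_neg (hne1 c hcmem), if_neg (hne2 c hcmem), if_neg (hne3 c hcmem), if_neg (hne4 c hcmem), if_neg (hne5 c hcmem)] at hle
              split_ifs at hle <;> first | assumption | omega
            · have hne6 : ∀ f ∈ a :: rest, f ≠ "jpeg" := by
                intro f hf he; exact h6 (he ▸ List.contains_iff_mem.mpr hf)
              simp only [h6]
              have hall : ∀ f ∈ a :: rest, pvRk r? f = 7 := by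
                intro f hf
                simp only [pvRk, if_neg (hne f hf), if_neg (hne1 f hf), if_neg (hne2 f hf),
                  if_neg (hne3 f hf), if_neg (hne4 f hf), if_neg (hne5 f hf), if_neg (hne6 f hf)]
              have hstay : pvMinFrom (pvRk r?) a rest = a := by
                apply pvMinFrom_stay
                intro y hy
                rw [hall y (List.mem_cons_of_mem _ hy), hall a List.mem_cons_self]
                omega
              rw [← hc] at hstay
              exact hstay.symm

-- the core equivalence, over the processed request
lemma pv_core (r? : Option String) (available : List String) :
    (match r? with
     | some r => if available.contains r then r else pvFall available
     | none => pvFall available) =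
    (match available with
     | [] => "png32"
     | a :: rest => pvMinFrom (pvRk r?) a rest) := by
  cases available with
  | nil =>
    cases r? with
    | none => rfl
    | some r => simp [pvFall]
  | cons a rest =>
    cases r? with
    | none => exact pv_fall_eq none a rest (by intro f _ h; cases h)
    | some r =>
      by_cases hcon : (a :: rest).contains r
      · simp only [hcon, if_pos]
        have hrmem : r = a ∨ r ∈ rest := by
          rcases List.mem_cons.mp (List.contains_iff_mem.mp hcon) with h | h
          · exact Or.inl h
          · exact Or.inr h
        have hle := pvMinFrom_min (pvRk (some r)) rest a r hrmem
        have h0 : pvRk (some r) r = 0 := by simp [pvRk]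
        rw [h0] at hle
        have := pvRk_eq_zero (some r) (pvMinFrom (pvRk (some r)) a rest) hle
        exact Option.some.inj this
      · simp only [hcon]
        apply pv_fall_eq
        intro f hf he
        obtain rfl : r = f := Option.some.inj he
        exact hcon (List.contains_iff_mem.mpr hf)

-- ===== VERDICT (by name: the statement is the Claim_ definition above) =====
theorem prefer_arcgis_format_py_spec : Claim_equal_prefer_arcgis_format_py := by
  intro requested_fmt available _
  unfold Spec_prefer_arcgis_format_py
  rw [pvA_eq, pvB_eq, pv_core]
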